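-- pv_equiv track=rewrite | github.com/gsenno/sequential-bell-with-comm | sequential-bell-with-comm/src/linopttools.py | strategyToDistribution
-- ===== SOURCE A (Python) =====
-- def strategyToDistribution(stgAlice, stgBob,outputsAliceSequence,outputsBob):
--     vector = []
--     for x in range (0,len(outputsAliceSequence)):
--         for y in range (0,len(outputsBob)):
--             for a in range (0,outputsAliceSequence[x]):
--                 for b in range (0,outputsBob[y]):
--                     if (a==stgAlice[x])&(b==stgBob[y]):
--                         vector.append(1)
--                     else:
--                         vector.append(0)
-- #return VerticesToCG(vector, outputsAliceSequence, outputsBob)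
--     return vector
-- ===== SOURCE B (Python) =====
-- def strategyToDistribution(stgAlice, stgBob, outputsAliceSequence, outputsBob):
--     vector = []
--     for x, na in enumerate(outputsAliceSequence):
--         for y, nb in enumerate(outputsBob):
--             if na > 0 and nb > 0:
--                 block = [0] * (na * nb)
--                 a, b = stgAlice[x], stgBob[y]
--                 if 0 <= a < na and 0 <= b < nb:
--                     block[a * nb + b] = 1
--                 vector.extend(block)
--     return vector
-- ===== Notes on version B (the rewrite author's own statement) =====
-- stated objective: alternative
-- what changed: The two innermost loops scanning every (a,b) output pair with equality tests are replaced by building a zero block and placing the single 1 at the arithmetically computed index a*nb+b (with an in-range guard).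
import Mathlib
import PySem

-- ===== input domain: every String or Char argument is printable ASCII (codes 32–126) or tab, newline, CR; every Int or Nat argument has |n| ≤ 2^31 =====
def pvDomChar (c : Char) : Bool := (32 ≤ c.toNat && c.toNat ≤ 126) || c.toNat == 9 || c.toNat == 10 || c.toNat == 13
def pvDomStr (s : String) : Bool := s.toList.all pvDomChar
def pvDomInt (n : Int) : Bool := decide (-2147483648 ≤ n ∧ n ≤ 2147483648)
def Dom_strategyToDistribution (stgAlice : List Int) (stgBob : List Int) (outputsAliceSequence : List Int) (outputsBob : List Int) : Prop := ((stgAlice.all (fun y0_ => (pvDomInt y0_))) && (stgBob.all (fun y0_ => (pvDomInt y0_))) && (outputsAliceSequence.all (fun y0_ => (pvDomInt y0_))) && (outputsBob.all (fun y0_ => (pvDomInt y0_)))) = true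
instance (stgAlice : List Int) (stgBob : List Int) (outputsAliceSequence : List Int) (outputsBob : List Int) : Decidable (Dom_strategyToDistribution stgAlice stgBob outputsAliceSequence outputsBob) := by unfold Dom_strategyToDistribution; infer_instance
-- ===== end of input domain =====

-- B replaces A's two innermost scanning loops by placing the single 1 at the arithmetically computed index a*nb+b in a zero block (alternative decomposition, same asymptotics).


-- ===== PORT A =====
def strategyToDistribution (stgAlice : List Int) (stgBob : List Int) (outputsAliceSequence : List Int) (outputsBob : List Int) : List Int :=
  (PySem.List.pyRange 0 (outputsAliceSequence.length : Int) 1).foldl (fun vector x =>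
    (PySem.List.pyRange 0 (outputsBob.length : Int) 1).foldl (fun vector y =>
      (PySem.List.pyRange 0 (PySem.List.pyGetD outputsAliceSequence x 0) 1).foldl (fun vector a =>
        (PySem.List.pyRange 0 (PySem.List.pyGetD outputsBob y 0) 1).foldl (fun vector b =>
          if a == PySem.List.pyGetD stgAlice x 0 && b == PySem.List.pyGetD stgBob y 0
          then vector ++ [1] else vector ++ [0]) vector) vector) vector) []

-- ===== PORT B =====
-- block = [0]*(na*nb), then block[a*nb+b] = 1 when a, b are in range
def pvAltBlock (na nb a b : Int) : List Int :=
  let block := List.replicate (na * nb).toNat (0 : Int)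
  if 0 ≤ a && a < na && 0 ≤ b && b < nb then block.set (a * nb + b).toNat 1 else block

def strategyToDistribution_alt (stgAlice : List Int) (stgBob : List Int) (outputsAliceSequence : List Int) (outputsBob : List Int) : List Int :=
  (PySem.List.enumerate outputsAliceSequence).foldl (fun vector p =>
    (PySem.List.enumerate outputsBob).foldl (fun vector q =>
      if p.2 > 0 && q.2 > 0 then
        vector ++ pvAltBlock p.2 q.2 (PySem.List.pyGetD stgAlice p.1 0) (PySem.List.pyGetD stgBob q.1 0)
      else vector) vector) []

-- ===== PRECONDITION & SPEC =====
-- Pre_ excludes exactly the inputs where the Python A raises IndexError: a strategy list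
-- shorter than needed at some position (x,y) whose two output counts are both positive.
def Pre_strategyToDistribution (stgAlice : List Int) (stgBob : List Int) (outputsAliceSequence : List Int) (outputsBob : List Int) : Prop :=
  ∀ x, x < outputsAliceSequence.length → ∀ y, y < outputsBob.length →
    0 < outputsAliceSequence.getD x 0 → 0 < outputsBob.getD y 0 →
    (x < stgAlice.length ∧ y < stgBob.length)
instance (stgAlice : List Int) (stgBob : List Int) (outputsAliceSequence : List Int) (outputsBob : List Int) : Decidable (Pre_strategyToDistribution stgAlice stgBob outputsAliceSequence outputsBob) := by unfold Pre_strategyToDistribution; infer_instance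
def pvWitness_strategyToDistribution : List Int × List Int × List Int × List Int := ([0], [1], [2], [2])
def Spec_strategyToDistribution (stgAlice : List Int) (stgBob : List Int) (outputsAliceSequence : List Int) (outputsBob : List Int) (out : List Int) : Prop := out = strategyToDistribution_alt stgAlice stgBob outputsAliceSequence outputsBob
instance (stgAlice : List Int) (stgBob : List Int) (outputsAliceSequence : List Int) (outputsBob : List Int) (out : List Int) : Decidable (Spec_strategyToDistribution stgAlice stgBob outputsAliceSequence outputsBob out) := by unfold Spec_strategyToDistribution; infer_instance

-- ===== CLAIM (what is proved, stated in full; the proofs are below) =====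
def Claim_equal_strategyToDistribution : Prop := ∀ (stgAlice : List Int) (stgBob : List Int) (outputsAliceSequence : List Int) (outputsBob : List Int), Dom_strategyToDistribution stgAlice stgBob outputsAliceSequence outputsBob → Pre_strategyToDistribution stgAlice stgBob outputsAliceSequence outputsBob → Spec_strategyToDistribution stgAlice stgBob outputsAliceSequence outputsBob (strategyToDistribution stgAlice stgBob outputsAliceSequence outputsBob)

-- ===== LEMMAS AND PROOFS =====

-- A's inner pair of loops, flattened
def pvABlock (na nb a0 b0 : Int) : List Int :=
  (PySem.List.pyRange 0 na 1).flatMap (fun a =>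
    (PySem.List.pyRange 0 nb 1).map (fun b => if a == a0 && b == b0 then (1 : Int) else 0))

lemma pv_rowmap_flat (naN nbN : Nat) (f : Nat → Nat → Int) :
    (List.range naN).flatMap (fun a => (List.range nbN).map (f a)) =
      (List.range (naN * nbN)).map (fun i => f (i / nbN) (i % nbN)) := by
  rcases Nat.eq_zero_or_pos nbN with h0 | hpos
  · subst h0; simp
  · induction naN with
    | zero => simp
    | succ n ih =>
      rw [List.range_succ, List.flatMap_append, ih, Nat.succ_mul, List.range_add,
        List.map_append, List.map_map]
      congr 1
      simp only [List.flatMap_cons, List.flatMap_nil, List.append_nil]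
      apply List.map_congr_left
      intro j hj
      simp only [List.mem_range] at hj
      simp only [Function.comp]
      have hd : (n * nbN + j) / nbN = n := by
        rw [Nat.add_div_of_dvd_right ⟨n, Nat.mul_comm _ _⟩, Nat.div_eq_of_lt hj,
          Nat.mul_div_cancel _ hpos, Nat.add_zero]
      have hm : (n * nbN + j) % nbN = j := by
        rw [Nat.add_comm, Nat.add_mul_mod_self_right, Nat.mod_eq_of_lt hj]
      rw [hd, hm]

lemma pv_set_as_map (n k : Nat) :
    (List.replicate n (0 : Int)).set k 1 =
      (List.range n).map (fun i => if i = k then (1 : Int) else 0) := by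
  apply List.ext_getElem
  · simp
  · intro i h1 h2
    simp only [List.length_set, List.length_replicate] at h1
    rw [List.getElem_set, List.getElem_map, List.getElem_range, List.getElem_replicate]
    by_cases hk : k = i <;> simp [hk, eq_comm]

lemma pv_block_eq (na nb a0 b0 : Int) :
    pvABlock na nb a0 b0 =
      (if na > 0 && nb > 0 then pvAltBlock na nb a0 b0 else []) := by
  by_cases hna : 0 < na
  · by_cases hnb : 0 < nb
    · obtain ⟨naN, rfl⟩ := Int.eq_ofNat_of_zero_le hna.le
      obtain ⟨nbN, rfl⟩ := Int.eq_ofNat_of_zero_le hnb.le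
      have hnaN : 0 < naN := by exact_mod_cast hna
      have hnbN : 0 < nbN := by exact_mod_cast hnb
      have hrange : ∀ m : Nat, PySem.List.pyRange 0 (m : Int) 1 = (List.range m).map Int.ofNat := by
        intro m
        rw [PySem.List.pyRange_one]
        simp only [Int.sub_zero, Int.toNat_natCast]
        exact List.map_congr_left (fun k _ => by simp)
      have hguard : (((naN : Int) > 0 && (nbN : Int) > 0)) = true := by
        simp only [gt_iff_lt, Bool.and_eq_true, decide_eq_true_eq]
        exact ⟨hna, hnb⟩
      have hmul : ((naN : Int) * (nbN : Int)).toNat = naN * nbN := by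
        rw [← Int.natCast_mul, Int.toNat_natCast]
      have key : ∀ i, i < naN * nbN →
          ((Int.ofNat (i / nbN) == a0 && Int.ofNat (i % nbN) == b0) = true ↔
            (0 ≤ a0 ∧ a0 < (naN : Int) ∧ 0 ≤ b0 ∧ b0 < (nbN : Int) ∧ i = a0.toNat * nbN + b0.toNat)) := by
        intro i hi
        have hdiv : i / nbN < naN := Nat.div_lt_of_lt_mul (by rw [Nat.mul_comm]; exact hi)
        have hmod : i % nbN < nbN := Nat.mod_lt _ hnbN
        have hdm := Nat.div_add_mod i nbN
        have hdm2 : i / nbN * nbN + i % nbN = i := by rw [Nat.mul_comm] at hdm; exact hdm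
        simp only [Bool.and_eq_true, beq_iff_eq, Int.ofNat_eq_natCast]
        constructor
        · rintro ⟨ha, hb⟩
          refine ⟨ha ▸ Int.natCast_nonneg _, ha ▸ (by exact_mod_cast hdiv), hb ▸ Int.natCast_nonneg _, hb ▸ (by exact_mod_cast hmod), ?_⟩
          have ha' : a0.toNat = i / nbN := by rw [← ha, Int.toNat_natCast]
          have hb' : b0.toNat = i % nbN := by rw [← hb, Int.toNat_natCast]
          rw [ha', hb']
          exact hdm2.symm
        · rintro ⟨h1, h2, h3, h4, h5⟩
          have hlt : b0.toNat < nbN := by omega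
          have hd : i / nbN = a0.toNat := by
            rw [h5, Nat.add_comm, Nat.add_mul_div_right _ _ hnbN, Nat.div_eq_of_lt hlt, Nat.zero_add]
          have hm : i % nbN = b0.toNat := by
            rw [h5, Nat.add_comm, Nat.add_mul_mod_self_right, Nat.mod_eq_of_lt hlt]
          exact ⟨by rw [hd]; omega, by rw [hm]; omega⟩
      have hAlt : pvAltBlock (naN : Int) (nbN : Int) a0 b0 =
          (if 0 ≤ a0 && a0 < (naN:Int) && 0 ≤ b0 && b0 < (nbN:Int)
           then (List.replicate (naN * nbN) (0:Int)).set ((a0 * (nbN:Int) + b0).toNat) 1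
           else List.replicate (naN * nbN) (0:Int)) := by
        unfold pvAltBlock
        rw [hmul]
      rw [if_pos hguard, hAlt]
      unfold pvABlock
      rw [hrange naN, hrange nbN, List.flatMap_map]
      simp only [List.map_map]
      rw [pv_rowmap_flat naN nbN]
      simp only [Function.comp]
      by_cases hin : ((0 ≤ a0 && a0 < (naN:Int) && 0 ≤ b0 && b0 < (nbN:Int))) = true
      · rw [if_pos hin, pv_set_as_map]
        simp only [Bool.and_eq_true, decide_eq_true_eq] at hin
        obtain ⟨⟨⟨h1, h2⟩, h3⟩, h4⟩ := hin
        have hk : ((a0 * (nbN:Int) + b0).toNat) = a0.toNat * nbN + b0.toNat := by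
          have hc : a0 * (nbN:Int) = ((a0.toNat * nbN : Nat) : Int) := by
            push_cast
            rw [Int.toNat_of_nonneg h1]
          omega
        rw [hk]
        apply List.map_congr_left
        intro i hi
        simp only [List.mem_range] at hi
        by_cases hc : (Int.ofNat (i / nbN) == a0 && Int.ofNat (i % nbN) == b0) = true
        · rw [if_pos hc, if_pos ((key i hi).mp hc).2.2.2.2]
        · rw [if_neg hc, if_neg (fun h => hc ((key i hi).mpr ⟨h1, h2, h3, h4, h⟩))]
      · rw [if_neg hin]
        simp only [Bool.and_eq_true, decide_eq_true_eq] at hin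
        rw [show (List.replicate (naN*nbN) (0:Int)) = (List.range (naN*nbN)).map (fun _ => (0:Int)) by simp]
        apply List.map_congr_left
        intro i hi
        simp only [List.mem_range] at hi
        rw [if_neg]
        intro hc
        have h := (key i hi).mp hc
        exact hin (by tauto)
    · have hnil : PySem.List.pyRange 0 nb 1 = [] := PySem.List.pyRange_one_eq_nil (by omega)
      have hg : ¬ ((na > 0 && nb > 0) = true) := by
        simp only [gt_iff_lt, Bool.and_eq_true, decide_eq_true_eq]
        omega
      simp [pvABlock, hnil, hg]
  · have hnil : PySem.List.pyRange 0 na 1 = [] := PySem.List.pyRange_one_eq_nil (by omega)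
    have hg : ¬ ((na > 0 && nb > 0) = true) := by
      simp only [gt_iff_lt, Bool.and_eq_true, decide_eq_true_eq]
      omega
    simp [pvABlock, hnil, hg]

lemma pv_A_flat (stgAlice stgBob oA oB : List Int) :
    strategyToDistribution stgAlice stgBob oA oB =
      (PySem.List.pyRange 0 (oA.length : Int) 1).flatMap (fun x =>
        (PySem.List.pyRange 0 (oB.length : Int) 1).flatMap (fun y =>
          pvABlock (PySem.List.pyGetD oA x 0) (PySem.List.pyGetD oB y 0)
            (PySem.List.pyGetD stgAlice x 0) (PySem.List.pyGetD stgBob y 0))) := by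
  unfold strategyToDistribution
  have L2 : ∀ (x y : Int) (v : List Int),
      (PySem.List.pyRange 0 (PySem.List.pyGetD oA x 0) 1).foldl (fun v a =>
        (PySem.List.pyRange 0 (PySem.List.pyGetD oB y 0) 1).foldl (fun v b =>
          if a == PySem.List.pyGetD stgAlice x 0 && b == PySem.List.pyGetD stgBob y 0
          then v ++ [1] else v ++ [0]) v) v
      = v ++ pvABlock (PySem.List.pyGetD oA x 0) (PySem.List.pyGetD oB y 0)
          (PySem.List.pyGetD stgAlice x 0) (PySem.List.pyGetD stgBob y 0) := by
    intro x y v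
    rw [PySem.List.foldl_congr_mem _ _
        (fun v a => v ++ (PySem.List.pyRange 0 (PySem.List.pyGetD oB y 0) 1).map
          (fun b => if a == PySem.List.pyGetD stgAlice x 0 && b == PySem.List.pyGetD stgBob y 0
            then (1:Int) else 0)) _
        (by
          intro acc a _
          rw [PySem.List.foldl_congr_mem _ _
              (fun v b => v ++ [if a == PySem.List.pyGetD stgAlice x 0 && b == PySem.List.pyGetD stgBob y 0 then (1:Int) else 0]) _
              (by intro acc2 b _; split <;> simp [*]),
            PySem.List.foldl_append_singleton_eq_map]),
      PySem.List.foldl_append_eq_flatMap]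
    rfl
  rw [PySem.List.foldl_congr_mem _ _
      (fun v x => v ++ (PySem.List.pyRange 0 (oB.length : Int) 1).flatMap (fun y =>
        pvABlock (PySem.List.pyGetD oA x 0) (PySem.List.pyGetD oB y 0)
          (PySem.List.pyGetD stgAlice x 0) (PySem.List.pyGetD stgBob y 0))) _
      (by
        intro acc x _
        rw [PySem.List.foldl_congr_mem _ _
            (fun v y => v ++ pvABlock (PySem.List.pyGetD oA x 0) (PySem.List.pyGetD oB y 0)
              (PySem.List.pyGetD stgAlice x 0) (PySem.List.pyGetD stgBob y 0)) _
            (by intro acc2 y _; exact L2 x y acc2),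
          PySem.List.foldl_append_eq_flatMap]),
    PySem.List.foldl_append_eq_flatMap]
  rfl

lemma pv_B_flat (stgAlice stgBob oA oB : List Int) :
    strategyToDistribution_alt stgAlice stgBob oA oB =
      (PySem.List.pyRange 0 (oA.length : Int) 1).flatMap (fun x =>
        (PySem.List.pyRange 0 (oB.length : Int) 1).flatMap (fun y =>
          if PySem.List.pyGetD oA x 0 > 0 && PySem.List.pyGetD oB y 0 > 0
          then pvAltBlock (PySem.List.pyGetD oA x 0) (PySem.List.pyGetD oB y 0)
            (PySem.List.pyGetD stgAlice x 0) (PySem.List.pyGetD stgBob y 0)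
          else [])) := by
  unfold strategyToDistribution_alt
  rw [PySem.List.enumerate_eq_map_pyRange oA 0, PySem.List.enumerate_eq_map_pyRange oB 0]
  rw [List.foldl_map]
  simp only [PySem.List.len]
  rw [PySem.List.foldl_congr_mem _ _
      (fun v x => v ++ (PySem.List.pyRange 0 (oB.length : Int) 1).flatMap (fun y =>
        if PySem.List.pyGetD oA x 0 > 0 && PySem.List.pyGetD oB y 0 > 0
        then pvAltBlock (PySem.List.pyGetD oA x 0) (PySem.List.pyGetD oB y 0)
          (PySem.List.pyGetD stgAlice x 0) (PySem.List.pyGetD stgBob y 0)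
        else [])) _
      (by
        intro acc x _
        rw [List.foldl_map]
        rw [PySem.List.foldl_congr_mem _ _
            (fun v y => v ++ (if PySem.List.pyGetD oA x 0 > 0 && PySem.List.pyGetD oB y 0 > 0
              then pvAltBlock (PySem.List.pyGetD oA x 0) (PySem.List.pyGetD oB y 0)
                (PySem.List.pyGetD stgAlice x 0) (PySem.List.pyGetD stgBob y 0)
              else [])) _
            (by intro acc2 y _; by_cases hg : (PySem.List.pyGetD oA x 0 > 0 && PySem.List.pyGetD oB y 0 > 0) = true <;> simp [hg]),
          PySem.List.foldl_append_eq_flatMap]),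
    PySem.List.foldl_append_eq_flatMap]
  rfl

-- ===== VERDICT (by name: the statement is the Claim_ definition above) =====
theorem strategyToDistribution_spec : Claim_equal_strategyToDistribution := by
  intro stgAlice stgBob oA oB _ _
  unfold Spec_strategyToDistribution
  rw [pv_A_flat, pv_B_flat]
  simp only [pv_block_eq]
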